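-- pv_equiv track=rewrite | github.com/YashTayal04/DSA-Questions | Stacks/sortStackUsingAnotherStack.py | solve
-- ===== SOURCE A (Python) =====
-- def solve(A):
--     l1=[]
--     l2=[]
--     for i in A:
--         while len(l1)>0 and l1[-1]>i:
--             l2.append(l1.pop())
--         l1.append(i)
--         while len(l2)>0:
--             l1.append(l2.pop())
--     return l1
-- ===== SOURCE B (Python) =====
-- def solve(A):
--     # Selection sort: repeatedly scan the remaining items for the minimum,
--     # remove its first occurrence, and append it to the result.
--     rest = list(A)
--     result = []
--     while rest:
--         m = rest[0]
--         for x in rest[1:]: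
--             if x < m:
--                 m = x
--         rest.remove(m)
--         result.append(m)
--     return result
-- ===== Notes on version B (the rewrite author's own statement) =====
-- stated objective: alternative
-- what changed: Replaces the two-stack per-element insertion sort with a selection sort that repeatedly scans the remaining list for its minimum, removes it, and appends it to the result.
import Mathlib
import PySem

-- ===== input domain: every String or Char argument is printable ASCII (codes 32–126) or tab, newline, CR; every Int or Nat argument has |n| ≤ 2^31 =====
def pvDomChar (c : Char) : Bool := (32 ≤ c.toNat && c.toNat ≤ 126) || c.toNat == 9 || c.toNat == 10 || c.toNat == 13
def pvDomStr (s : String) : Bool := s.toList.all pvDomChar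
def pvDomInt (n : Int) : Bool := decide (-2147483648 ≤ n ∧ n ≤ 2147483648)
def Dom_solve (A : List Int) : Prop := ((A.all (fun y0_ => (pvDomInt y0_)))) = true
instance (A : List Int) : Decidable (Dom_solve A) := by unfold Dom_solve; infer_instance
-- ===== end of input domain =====

-- B replaces the two-stack insertion sort with a selection sort (repeated min-scan); alternative algorithm, same cost.


-- ===== PORT A =====
-- stacks are Lean lists with the head as the stack top; the returned l1 is reversed back to bottom-to-top order
-- inner 'while len(l1)>0 and l1[-1]>i'
def solveWhile1 (i : Int) : List Int → List Int → List Int × List Int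
  | h :: t, l2 => if h > i then solveWhile1 i t (h :: l2) else (h :: t, l2)
  | [], l2 => ([], l2)

-- inner 'while len(l2)>0'
def solveWhile2 : List Int → List Int → List Int
  | l1, [] => l1
  | l1, h :: t => solveWhile2 (h :: l1) t

def solve (A : List Int) : List Int :=
  (A.foldl (fun (s : List Int × List Int) i =>
    let p := solveWhile1 i s.1 s.2
    (solveWhile2 (i :: p.1) p.2, [])) ([], [])).1.reverse

-- ===== PORT B =====
-- 'm = rest[0]; for x in rest[1:]: if x < m: m = x'
def solveAltMin (m : Int) (t : List Int) : Int :=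
  t.foldl (fun m x => if x < m then x else m) m

-- the scanned minimum is an element of the scanned list (needed for termination of the outer loop)
theorem solveAltMin_mem (m : Int) (t : List Int) : solveAltMin m t ∈ m :: t := by
  induction t generalizing m with
  | nil => simp [solveAltMin]
  | cons a t ih =>
    have hrw : solveAltMin m (a :: t) = solveAltMin (if a < m then a else m) t := rfl
    rw [hrw]
    rcases List.mem_cons.1 (ih (if a < m then a else m)) with e | e
    · rw [e]; split <;> simp
    · exact List.mem_cons_of_mem _ (List.mem_cons_of_mem _ e)

-- 'while rest: … rest.remove(m); result.append(m)'  (rest.remove = List.erase, first occurrence)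
def solveAltLoop : List Int → List Int
  | [] => []
  | h :: t =>
    let m := solveAltMin h t
    m :: solveAltLoop ((h :: t).erase m)
  termination_by l => l.length
  decreasing_by
    have := List.length_erase_of_mem (solveAltMin_mem h t)
    simp_all

def solve_alt (A : List Int) : List Int := solveAltLoop A

-- ===== PRECONDITION & SPEC =====
def Spec_solve (A : List Int) (out : List Int) : Prop := out = solve_alt A
instance (A : List Int) (out : List Int) : Decidable (Spec_solve A out) := by unfold Spec_solve; infer_instance

-- ===== CLAIM (what is proved, stated in full; the proofs are below) =====
def Claim_equal_solve : Prop := ∀ (A : List Int), Dom_solve A → Spec_solve A (solve A)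

-- ===== LEMMAS AND PROOFS =====

theorem w1_spec (i : Int) (l1 acc : List Int) :
    solveWhile1 i l1 acc =
      (l1.dropWhile (fun h => decide (h > i)), (l1.takeWhile (fun h => decide (h > i))).reverse ++ acc) := by
  induction l1 generalizing acc with
  | nil => simp [solveWhile1]
  | cons h t ih =>
    simp only [solveWhile1]
    by_cases hh : h > i
    · simp [hh, ih, List.dropWhile, List.takeWhile]
    · simp [hh, List.dropWhile, List.takeWhile]

theorem w2_spec (l1 l2 : List Int) : solveWhile2 l1 l2 = l2.reverse ++ l1 := by
  induction l2 generalizing l1 with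
  | nil => simp [solveWhile2]
  | cons h t ih => simp [solveWhile2, ih]

def stepA (l1 : List Int) (i : Int) : List Int := List.orderedInsert (· ≥ ·) i l1

theorem step_eq (l1 : List Int) (i : Int) :
    solveWhile2 (i :: (solveWhile1 i l1 []).1) (solveWhile1 i l1 []).2 = stepA l1 i := by
  rw [w1_spec, w2_spec]
  induction l1 with
  | nil => simp [stepA, List.orderedInsert]
  | cons h t ih =>
    by_cases hh : h > i
    · have hng : ¬ (i ≥ h) := by omega
      simp only [stepA, List.orderedInsert, if_neg hng, List.takeWhile, List.dropWhile,
        decide_eq_true hh] at ih ⊢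
      simpa using ih
    · have hg : i ≥ h := by omega
      simp [stepA, List.orderedInsert, hg, List.takeWhile, List.dropWhile, hh]

theorem foldA_eq (A : List Int) (l : List Int) :
    (A.foldl (fun (s : List Int × List Int) i =>
      let p := solveWhile1 i s.1 s.2
      (solveWhile2 (i :: p.1) p.2, [])) (l, [])) = (A.foldl stepA l, []) := by
  induction A generalizing l with
  | nil => simp
  | cons a t ih => simpa [step_eq] using ih (stepA l a)

theorem foldA_perm (A l : List Int) : List.Perm (A.foldl stepA l) (l ++ A) := by
  induction A generalizing l with
  | nil => simp
  | cons a t ih =>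
    exact (ih _).trans (((List.perm_orderedInsert _ a l).append_right t).trans List.perm_middle.symm)

theorem foldA_pairwise (A l : List Int) (hl : l.Pairwise (· ≥ ·)) :
    (A.foldl stepA l).Pairwise (· ≥ ·) := by
  induction A generalizing l with
  | nil => exact hl
  | cons a t ih => exact ih _ (List.Pairwise.orderedInsert a l hl)

theorem solve_perm (A : List Int) : List.Perm (solve A) A := by
  unfold solve
  rw [foldA_eq]
  exact (List.reverse_perm _).trans (by simpa using foldA_perm A [])

theorem solve_pairwise (A : List Int) : (solve A).Pairwise (· ≤ ·) := by
  unfold solve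
  rw [foldA_eq]
  have := foldA_pairwise A [] (by simp)
  exact List.pairwise_reverse.2 (this.imp (fun h => h))

theorem solveAltMin_le (m : Int) (t : List Int) : ∀ x ∈ m :: t, solveAltMin m t ≤ x := by
  induction t generalizing m with
  | nil => simp [solveAltMin]
  | cons a t ih =>
    intro x hx
    have hrw : solveAltMin m (a :: t) = solveAltMin (if a < m then a else m) t := rfl
    rw [hrw]
    rcases List.mem_cons.1 hx with rfl | hx'
    · exact le_trans (ih _ _ List.mem_cons_self) (by split <;> omega)
    · rcases List.mem_cons.1 hx' with rfl | hx''
      · exact le_trans (ih _ _ List.mem_cons_self) (by split <;> omega)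
      · exact ih _ _ (List.mem_cons_of_mem _ hx'')

theorem solveAlt_perm : ∀ (n : Nat) (l : List Int), l.length ≤ n → List.Perm (solveAltLoop l) l
  | _, [], _ => by simp [solveAltLoop]
  | 0, h :: t, hn => by simp at hn
  | n + 1, h :: t, hn => by
    rw [solveAltLoop]
    have hm := solveAltMin_mem h t
    have hlen : ((h :: t).erase (solveAltMin h t)).length ≤ n := by
      rw [List.length_erase_of_mem hm]
      simp at hn ⊢
      omega
    exact ((solveAlt_perm n _ hlen).cons _).trans (List.perm_cons_erase hm).symm

theorem solveAlt_pairwise : ∀ (n : Nat) (l : List Int), l.length ≤ n → (solveAltLoop l).Pairwise (· ≤ ·)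
  | _, [], _ => by simp [solveAltLoop]
  | 0, h :: t, hn => by simp at hn
  | n + 1, h :: t, hn => by
    rw [solveAltLoop]
    have hm := solveAltMin_mem h t
    have hlen : ((h :: t).erase (solveAltMin h t)).length ≤ n := by
      rw [List.length_erase_of_mem hm]
      simp at hn ⊢
      omega
    refine List.Pairwise.cons ?_ (solveAlt_pairwise n _ hlen)
    intro b hb
    have hb' : b ∈ (h :: t).erase (solveAltMin h t) :=
      ((solveAlt_perm n _ hlen).mem_iff).1 hb
    exact solveAltMin_le h t b (List.mem_of_mem_erase hb')

-- ===== VERDICT (by name: the statement is the Claim_ definition above) =====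
theorem solve_spec : Claim_equal_solve := by
  intro A _
  unfold Spec_solve solve_alt
  have hA : List.Perm (solve A) (solveAltLoop A) :=
    (solve_perm A).trans (solveAlt_perm A.length A le_rfl).symm
  exact List.Perm.eq_of_pairwise' (solve_pairwise A) (solveAlt_pairwise A.length A le_rfl) hA
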